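-- pv_equiv track=rewrite | github.com/beastx2008/BEAST | bot.py | get_enc_time
-- ===== SOURCE A (Python) =====
-- def get_enc_time(n):
--     sb = []
--     n2 = 1
--     while n > 0:
--         n3 = ((n % 10) + 1) % 10
--         if n2 % 2 == 0:
--             sb.insert(0, str(n3 + n2 * 2))
--         else:
--             sb.insert(0, str((n3 + 2) * n2 * 3))
--         n //= 10
--         n2 += 1
--     return ''.join(sb)
-- ===== SOURCE B (Python) =====
-- def _piece(ch, p):
--     d = (ord(ch) - 47) % 10
--     return str(d + p * 2) if p % 2 == 0 else str((d + 2) * p * 3)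
--
--
-- def get_enc_time(n):
--     if n <= 0:
--         return ''
--     s = str(n)
--     L = len(s)
--     return ''.join(_piece(ch, L - i) for i, ch in enumerate(s))
-- ===== Notes on version B (the rewrite author's own statement) =====
-- stated objective: simpler
-- what changed: Replaced A's while-loop that peels digits off n with // and % while front-inserting into a list and counting positions with an n2 counter by a single forward pass over str(n) that derives each digit's position arithmetically from the string length and joins the pieces in order.
import Mathlib
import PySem

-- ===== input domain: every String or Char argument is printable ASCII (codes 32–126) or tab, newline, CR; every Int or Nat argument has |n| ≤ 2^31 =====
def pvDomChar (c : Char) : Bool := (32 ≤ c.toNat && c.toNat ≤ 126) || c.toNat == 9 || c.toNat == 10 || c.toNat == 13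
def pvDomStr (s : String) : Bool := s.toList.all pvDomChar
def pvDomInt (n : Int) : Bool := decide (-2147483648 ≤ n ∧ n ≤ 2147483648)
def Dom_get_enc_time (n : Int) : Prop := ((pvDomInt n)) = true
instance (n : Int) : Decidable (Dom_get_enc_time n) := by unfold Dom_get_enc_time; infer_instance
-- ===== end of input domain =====

-- B replaces A's digit-peeling loop with front-insertion by a single forward pass over str(n),
-- deriving each digit's position arithmetically from the string length (objective: simpler).

-- ===== PORT A =====
theorem pv_floordiv10_toNat_lt (n : Int) (h : 0 < n) :
    (PySem.Int.floordiv n 10).toNat < n.toNat := by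
  rw [PySem.Int.floordiv_eq_ediv_of_pos (by omega)]
  omega

def get_enc_time_go (n n2 : Int) (sb : List String) : List String :=
  if h : 0 < n then
    let n3 := PySem.Int.mod (PySem.Int.mod n 10 + 1) 10
    get_enc_time_go (PySem.Int.floordiv n 10) (n2 + 1)
      (if PySem.Int.mod n2 2 = 0 then PySem.Int.toStr (n3 + n2 * 2) :: sb
       else PySem.Int.toStr ((n3 + 2) * n2 * 3) :: sb)
  else sb
termination_by n.toNat
decreasing_by exact pv_floordiv10_toNat_lt n h

def get_enc_time (n : Int) : String :=
  PySem.Str.join "" (get_enc_time_go n 1 [])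

-- ===== PORT B =====
def pieceB (ch : Char) (p : Int) : String :=
  let d := PySem.Int.mod ((ch.toNat : Int) - 47) 10
  if PySem.Int.mod p 2 = 0 then PySem.Int.toStr (d + p * 2)
  else PySem.Int.toStr ((d + 2) * p * 3)

def get_enc_time_alt (n : Int) : String :=
  if n ≤ 0 then "" else
    let s := PySem.Int.toStr n
    let L := PySem.Str.len s
    PySem.Str.join "" ((PySem.List.enumerate s.toList).map (fun ic => pieceB ic.2 (L - ic.1)))

-- ===== PRECONDITION & SPEC =====
def Spec_get_enc_time (n : Int) (out : String) : Prop := out = get_enc_time_alt n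
instance (n : Int) (out : String) : Decidable (Spec_get_enc_time n out) := by unfold Spec_get_enc_time; infer_instance

-- ===== CLAIM (what is proved, stated in full; the proofs are below) =====
def Claim_equal_get_enc_time : Prop := ∀ (n : Int), Dom_get_enc_time n → Spec_get_enc_time n (get_enc_time n)

-- ===== LEMMAS AND PROOFS =====

-- the string A appends for raw digit value d at (1-based, from the right) position k
def pieceA (d k : Int) : String :=
  let n3 := PySem.Int.mod (d + 1) 10
  if PySem.Int.mod k 2 = 0 then PySem.Int.toStr (n3 + k * 2)
  else PySem.Int.toStr ((n3 + 2) * k * 3)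

-- the list of strings A's loop produces for m, most-significant digit first,
-- when the least-significant digit of m sits at position k
def pieceList (m : Nat) (k : Int) : List String :=
  if _h : 0 < m then pieceList (m / 10) (k + 1) ++ [pieceA ((m % 10 : Nat) : Int) k] else []

theorem go_eq_pieceList (m : Nat) : ∀ (k : Int) (sb : List String),
    get_enc_time_go (m : Int) k sb = pieceList m k ++ sb := by
  induction m using Nat.strong_induction_on with
  | _ m ih =>
    intro k sb
    by_cases h : 0 < m
    · rw [get_enc_time_go, pieceList]
      simp only [h, dif_pos (by exact_mod_cast h : (0:Int) < m)]
      have hmod : PySem.Int.mod (m : Int) 10 = ((m % 10 : Nat) : Int) := by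
        rw [PySem.Int.mod_eq_emod_of_pos (by omega)]; omega
      have hdiv : PySem.Int.floordiv (m : Int) 10 = ((m / 10 : Nat) : Int) := by
        rw [PySem.Int.mod_eq_emod_of_pos (by omega)] at *
        rw [PySem.Int.floordiv_eq_ediv_of_pos (by omega)]; omega
      rw [hmod, hdiv, ih (m / 10) (Nat.div_lt_self h (by omega))]
      simp only [pieceA]
      split_ifs <;> simp
    · rw [get_enc_time_go, pieceList]
      simp [h]

theorem pieceB_digitChar (d : Nat) (hd : d < 10) (p : Int) :
    pieceB (Nat.digitChar d) p = pieceA (d : Int) p := by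
  have : ((Nat.digitChar d).toNat : Int) - 47 = (d : Int) + 1 := by
    interval_cases d <;> decide
  simp only [pieceB, pieceA, this]

theorem map_enum_eq_pieceList (m : Nat) : 0 < m → ∀ (t : Int),
    (PySem.List.enumerate (Nat.toDigits 10 m)).map
        (fun ic => pieceB ic.2 (((Nat.toDigits 10 m).length : Int) + t - ic.1))
      = pieceList m (1 + t) := by
  induction m using Nat.strong_induction_on with
  | _ m ih =>
    intro hm t
    by_cases hlt : m < 10
    · rw [Nat.toDigits_of_lt_base hlt, pieceList, dif_pos hm, Nat.div_eq_of_lt hlt,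
        pieceList, dif_neg (lt_irrefl 0)]
      rw [PySem.List.enumerate_cons, PySem.List.enumerate_nil, List.map_cons, List.map_nil]
      rw [pieceB_digitChar m hlt]
      simp only [List.nil_append, List.length_cons, List.length_nil]
      congr <;> omega
    · rw [not_lt] at hlt
      have hdivpos : 0 < m / 10 := Nat.div_pos hlt (by omega)
      rw [Nat.toDigits_of_base_le (by omega) hlt, PySem.List.enumerate_append, List.map_append]
      have hL : (((Nat.toDigits 10 (m / 10) ++ [Nat.digitChar (m % 10)]).length : Nat) : Int)
          = ((Nat.toDigits 10 (m / 10)).length : Int) + 1 := by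
        simp
      simp only [hL]
      rw [pieceList, dif_pos hm]
      congr 1
      · have harg : (1 + (t + 1) : Int) = 1 + t + 1 := by ring
        rw [← harg, ← ih (m / 10) (Nat.div_lt_self hm (by omega)) hdivpos (t + 1)]
        apply List.map_congr_left; intro ic _; congr 1; ring
      · rw [PySem.List.enumerate_cons, PySem.List.enumerate_nil, List.map_cons, List.map_nil]
        rw [pieceB_digitChar (m % 10) (Nat.mod_lt m (by omega))]
        congr 1
        congr 1
        omega

-- ===== VERDICT (by name: the statement is the Claim_ definition above) =====
theorem get_enc_time_spec : Claim_equal_get_enc_time := by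
  unfold Claim_equal_get_enc_time
  intro n _
  unfold Spec_get_enc_time get_enc_time get_enc_time_alt
  by_cases hn : n ≤ 0
  · rw [get_enc_time_go]
    simp only [hn, if_pos, dif_neg (show ¬ (0:Int) < n from by omega)]
    decide
  · rw [not_le] at hn
    simp only [if_neg (by omega : ¬ n ≤ 0)]
    have hcs : (PySem.Int.toStr n).toList = Nat.toDigits 10 n.toNat := by
      rw [PySem.Int.toList_toStr]
      simp [PySem.Int.toChars, show ¬ n < 0 from by omega]
    have hL : PySem.Str.len (PySem.Int.toStr n) = ((Nat.toDigits 10 n.toNat).length : Int) := by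
      rw [PySem.Str.len_eq, hcs]
    have hgo : get_enc_time_go n 1 [] = pieceList n.toNat 1 ++ [] := by
      have := go_eq_pieceList n.toNat 1 []
      rwa [Int.toNat_of_nonneg (by omega)] at this
    rw [hgo, hcs, hL, List.append_nil]
    congr 1
    have hmain := map_enum_eq_pieceList n.toNat (by omega) 0
    norm_num at hmain
    exact hmain.symm
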